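-- pv_equiv track=rewrite | github.com/LTX-GOD/LingXi | tools/level2_cve_poc.py | _mask_sensitive_command
-- ===== SOURCE A (Python) =====
-- def _mask_sensitive_command(command: str) -> str:
--     masked = str(command or "")
--     markers = (
--         "psession=",
--         "LEVEL2_1PANEL_PSESSION=",
--     )
--     for marker in markers:
--         if marker not in masked:
--             continue
--         prefix, suffix = masked.split(marker, 1)
--         token_end = len(suffix)
--         for idx, ch in enumerate(suffix):
--             if ch.isspace() or ch in "\"'":
--                 token_end = idx
--                 break
--         token = suffix[:token_end]
--         replacement = f"{marker}{token[:4]}***" if token else f"{marker}***"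
--         masked = prefix + replacement + suffix[token_end:]
--     return masked
-- ===== SOURCE B (Python) =====
-- def _mask_sensitive_command(command: str) -> str:
--     masked = str(command or "")
--     for marker in ("psession=", "LEVEL2_1PANEL_PSESSION="):
--         masked = _mask_once(masked, marker)
--     return masked
--
--
-- def _segments(s: str) -> list:
--     """Tokenize s once: maximal runs of non-delimiter chars, plus each
--     delimiter (whitespace or quote) as its own one-char segment."""
--     segs, cur = [], ""
--     for ch in s:
--         if ch.isspace() or ch in "\"'":
--             if cur:
--                 segs.append(cur)
--                 cur = ""
--             segs.append(ch)
--         else: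
--             cur += ch
--     if cur:
--         segs.append(cur)
--     return segs
--
--
-- def _mask_once(s: str, marker: str) -> str:
--     # The marker contains no delimiter, so its first occurrence lies inside
--     # a single segment, and that segment's end IS the token end: no token
--     # scan is needed at all.
--     out = []
--     segs = _segments(s)
--     for j, seg in enumerate(segs):
--         i = seg.find(marker)
--         if i >= 0:
--             out.append(seg[:i] + marker + seg[i + len(marker):][:4] + "***")
--             out.extend(segs[j + 1:])
--             return "".join(out)
--         out.append(seg)
--     return "".join(out)
-- ===== Notes on version B (the rewrite author's own statement) =====
-- stated objective: alternative
-- what changed: Replaces A's per-marker contains-check + split(marker,1) + enumerate-with-break token scan + splice by a staged tokenize→mask→join pipeline: the string is split once into maximal non-delimiter runs (delimiters kept as one-char segments), the first segment containing the marker is rewritten using seg.find, and the segments are rejoined — the segment boundary is the token end, so no token scan exists in B.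
import Mathlib
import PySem

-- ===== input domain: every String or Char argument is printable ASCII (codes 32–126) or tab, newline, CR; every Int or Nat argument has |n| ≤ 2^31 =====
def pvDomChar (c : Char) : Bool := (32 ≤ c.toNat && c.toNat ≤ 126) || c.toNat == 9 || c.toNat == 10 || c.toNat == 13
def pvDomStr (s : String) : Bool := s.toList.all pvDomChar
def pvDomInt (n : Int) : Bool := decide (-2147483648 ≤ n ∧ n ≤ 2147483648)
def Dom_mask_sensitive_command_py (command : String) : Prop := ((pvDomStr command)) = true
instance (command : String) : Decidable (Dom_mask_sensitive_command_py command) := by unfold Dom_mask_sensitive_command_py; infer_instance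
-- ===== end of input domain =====

-- B replaces A's per-marker contains/split/enumerate token scan by a staged tokenize→mask→join
-- pipeline: split into maximal non-delimiter runs, mask the first run containing the marker
-- (the run's end IS the token end, so no token scan), rejoin (alternative decomposition, same cost class).


-- ===== PORT A =====
-- ch.isspace() or ch in "\"'"   (shared by both ports: both Pythons contain this literal test)
def pvDelim (ch : Char) : Bool := PySem.Chars.isspace ch || (ch == '"' || ch == '\'')

-- A's 'for idx, ch in enumerate(suffix): if …: token_end = idx; break' loop (te = current token_end)
def pvTokLoopA : List (Int × Char) → Int → Int
  | [], te => te
  | (idx, ch) :: rest, te => if pvDelim ch then idx else pvTokLoopA rest te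

-- the body of A's 'for marker in markers' loop
def pvStepA (masked marker : List Char) : List Char :=
  if PySem.Chars.isIn marker masked then
    let parts := PySem.Chars.splitOnMax masked marker 1      -- masked.split(marker, 1)
    let prefx := parts.getD 0 []
    let suffix := parts.getD 1 []
    let token_end := pvTokLoopA (PySem.List.enumerate suffix 0) (suffix.length : Int)
    let token := PySem.List.slice suffix none (some token_end)
    let replacement := if token ≠ [] then marker ++ PySem.List.slice token none (some 4) ++ "***".toList
                       else marker ++ "***".toList
    prefx ++ replacement ++ PySem.List.slice suffix (some token_end) none
  else masked   -- 'continue'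

def mask_sensitive_command_py (command : String) : String :=
  -- str(command or "") is the identity on a str argument ('' stays '')
  let masked := command.toList
  let masked := pvStepA masked "psession=".toList
  let masked := pvStepA masked "LEVEL2_1PANEL_PSESSION=".toList
  String.ofList masked

-- ===== PORT B =====
-- B's _segments: one pass over s; cur is the pending run of non-delimiter chars
def pvSegGo : List Char → List Char → List (List Char)
  | [], cur => if cur = [] then [] else [cur]
  | c :: cs, cur =>
    if pvDelim c then
      (if cur = [] then [c] :: pvSegGo cs [] else cur :: [c] :: pvSegGo cs [])
    else pvSegGo cs (cur ++ [c])

-- B's _mask_once loop over the segments (out is implicit in the result; segs[j+1:] → rest.flatten)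
def pvMaskLoop (marker : List Char) : List (List Char) → List Char
  | [] => []
  | seg :: rest =>
    -- i = seg.find(marker); 'if i >= 0' branch (inlined i)
    if 0 ≤ PySem.Chars.find seg marker then
      (PySem.List.slice seg none (some (PySem.Chars.find seg marker)) ++ marker
        ++ PySem.List.slice (PySem.List.slice seg (some (PySem.Chars.find seg marker + (marker.length : Int))) none) none (some 4)
        ++ "***".toList) ++ rest.flatten
    else seg ++ pvMaskLoop marker rest

def mask_sensitive_command_py_alt (command : String) : String :=
  let masked := command.toList
  let masked := pvMaskLoop "psession=".toList (pvSegGo masked [])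
  let masked := pvMaskLoop "LEVEL2_1PANEL_PSESSION=".toList (pvSegGo masked [])
  String.ofList masked

-- ===== PRECONDITION & SPEC =====
def Spec_mask_sensitive_command_py (command : String) (out : String) : Prop := out = mask_sensitive_command_py_alt command
instance (command : String) (out : String) : Decidable (Spec_mask_sensitive_command_py command out) := by unfold Spec_mask_sensitive_command_py; infer_instance

-- ===== CLAIM (what is proved, stated in full; the proofs are below) =====
def Claim_equal_mask_sensitive_command_py : Prop := ∀ (command : String), Dom_mask_sensitive_command_py command → Spec_mask_sensitive_command_py command (mask_sensitive_command_py command)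

-- ===== LEMMAS AND PROOFS =====

-- the part of s before the first occurrence of m, and after the first occurrence of m
def pvBefore (m s : List Char) : List Char :=
  if m.isPrefixOf s then []
  else
    match s with
    | [] => []
    | c :: cs => c :: pvBefore m cs
termination_by s.length
decreasing_by simp only [List.length_cons]; omega

def pvAfter (m s : List Char) : List Char :=
  if m.isPrefixOf s then s.drop m.length
  else
    match s with
    | [] => []
    | _ :: cs => pvAfter m cs
termination_by s.length
decreasing_by simp only [List.length_cons]; omega

-- B's per-word token length, used only to state the common shape
def pvTokB : List Char → Nat
  | [] => 0
  | c :: cs => if pvDelim c then 0 else pvTokB cs + 1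

-- common shape of the masked replacement both programs build at the first occurrence
def pvMaskTail (m body : List Char) : List Char :=
  m ++ (body.take (pvTokB body)).take 4 ++ "***".toList ++ body.drop (pvTokB body)

lemma pv_isIn_nil {m : List Char} (h : m ≠ []) : PySem.Chars.isIn m [] = false := by
  rw [PySem.Chars.isIn_eq_false_iff]
  simp [h]

lemma pv_isIn_cons (m : List Char) (c : Char) (cs : List Char) :
    PySem.Chars.isIn m (c :: cs) = (m.isPrefixOf (c :: cs) || PySem.Chars.isIn m cs) := by
  rw [Bool.eq_iff_iff]
  simp [PySem.Chars.isIn_iff_infix, List.infix_cons_iff, List.isPrefixOf_iff_prefix]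

lemma pv_go_m0 (sep : List Char) (fuel : Nat) (l cur : List Char) (acc : List (List Char)) :
    PySem.Chars.splitOnMax.go sep fuel 0 l cur acc = ((cur.reverse ++ l) :: acc).reverse := by
  cases fuel with
  | zero => simp [PySem.Chars.splitOnMax.go]
  | succ f =>
    cases l with
    | nil => simp [PySem.Chars.splitOnMax.go]
    | cons c cs => simp [PySem.Chars.splitOnMax.go]

lemma pv_goG (fuel : Nat) (m : List Char) (hm : m ≠ []) :
    ∀ (l cur : List Char) (acc : List (List Char)), l.length < fuel →
      PySem.Chars.splitOnMax.go m fuel 1 l cur acc =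
        if PySem.Chars.isIn m l then acc.reverse ++ [cur.reverse ++ pvBefore m l, pvAfter m l]
        else acc.reverse ++ [cur.reverse ++ l] := by
  induction fuel with
  | zero => intro l cur acc h; omega
  | succ f ih =>
    intro l cur acc h
    cases l with
    | nil =>
      simp [PySem.Chars.splitOnMax.go, pv_isIn_nil hm]
    | cons c cs =>
      rw [show PySem.Chars.splitOnMax.go m (f+1) 1 (c :: cs) cur acc =
            (if m.isPrefixOf (c :: cs) then
              PySem.Chars.splitOnMax.go m f 0 (List.drop m.length (c :: cs)) [] (cur.reverse :: acc)
            else PySem.Chars.splitOnMax.go m f 1 cs (c :: cur) acc) from by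
        simp [PySem.Chars.splitOnMax.go]]
      by_cases hp : m.isPrefixOf (c :: cs)
      · rw [if_pos hp, pv_go_m0]
        have hin : PySem.Chars.isIn m (c :: cs) = true := by
          rw [pv_isIn_cons, hp]; simp
        rw [hin, if_pos rfl]
        rw [pvBefore, pvAfter, if_pos hp, if_pos hp]
        simp
      · rw [if_neg hp]
        have hlen : cs.length < f := by simp at h; omega
        rw [ih cs (c :: cur) acc hlen]
        rw [pv_isIn_cons, pvBefore, pvAfter, if_neg hp, if_neg hp]
        cases hin : PySem.Chars.isIn m cs with
        | false => simp [hp]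
        | true => simp [hp]

lemma pv_splitOnMax_eq (m s : List Char) (hm : m ≠ []) (h : PySem.Chars.isIn m s = true) :
    PySem.Chars.splitOnMax s m 1 = [pvBefore m s, pvAfter m s] := by
  rw [PySem.Chars.splitOnMax]
  rw [if_neg (by norm_num)]
  rw [show (1 : Int).toNat = 1 from rfl]
  rw [pv_goG (s.length + 1) m hm s [] [] (by omega)]
  simp [h]

lemma pv_tokB_le (s : List Char) : pvTokB s ≤ s.length := by
  induction s with
  | nil => simp [pvTokB]
  | cons c cs ih =>
    rw [pvTokB]
    by_cases hd : pvDelim c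
    · simp [hd]
    · simp [hd]; omega

lemma pv_tokLoop_enum (s : List Char) :
    ∀ (k d : Int), pvTokLoopA (PySem.List.enumerate s k) d =
      if pvTokB s < s.length then k + pvTokB s else d := by
  induction s with
  | nil => intro k d; simp [PySem.List.enumerate_nil, pvTokLoopA, pvTokB]
  | cons c cs ih =>
    intro k d
    rw [PySem.List.enumerate_cons, pvTokLoopA]
    by_cases hd : pvDelim c
    · simp [hd, pvTokB]
    · rw [if_neg (by simp [hd]), ih (k + 1) d]
      rw [pvTokB, if_neg hd]
      by_cases hlt : pvTokB cs < cs.length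
      · rw [if_pos hlt, if_pos (by simp; omega)]
        push_cast; ring
      · rw [if_neg hlt, if_neg (by simp; omega)]

lemma pv_tokA_eq (s : List Char) :
    pvTokLoopA (PySem.List.enumerate s 0) (s.length : Int) = (pvTokB s : Int) := by
  rw [pv_tokLoop_enum s 0 (s.length : Int)]
  by_cases h : pvTokB s < s.length
  · rw [if_pos h]; simp
  · rw [if_neg h]
    have := pv_tokB_le s
    have : pvTokB s = s.length := by omega
    rw [this]

lemma pv_slice4 (t : List Char) : PySem.List.slice t none (some 4) = t.take 4 := by
  rw [show (4 : Int) = ((4 : Nat) : Int) from by norm_num, PySem.List.slice_to_natCast]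

lemma pv_repl (m tok : List Char) :
    (if tok ≠ [] then m ++ tok.take 4 ++ "***".toList else m ++ "***".toList) =
      m ++ tok.take 4 ++ "***".toList := by
  by_cases h : tok = []
  · simp [h]
  · simp [h]

lemma pv_stepA_eq (m s : List Char) (hm : m ≠ []) :
    pvStepA s m = if PySem.Chars.isIn m s then pvBefore m s ++ pvMaskTail m (pvAfter m s) else s := by
  cases hin : PySem.Chars.isIn m s with
  | false => simp [pvStepA, hin]
  | true =>
    rw [pvStepA, hin]
    rw [pv_splitOnMax_eq m s hm hin]
    simp only [List.getD, List.getElem?_cons_zero, List.getElem?_cons_succ, Option.getD_some]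
    rw [pv_tokA_eq, PySem.List.slice_to_natCast, PySem.List.slice_from_natCast, pv_slice4, pv_repl]
    simp [pvMaskTail]

-- ---------- structure of the first occurrence ----------

lemma pvBefore_nil (m : List Char) : pvBefore m [] = [] := by
  rw [pvBefore]; split <;> rfl

lemma pvBefore_cons (m : List Char) (c : Char) (cs : List Char) :
    pvBefore m (c :: cs) = if m.isPrefixOf (c :: cs) then [] else c :: pvBefore m cs := by
  rw [pvBefore]

lemma pvAfter_nil (m : List Char) : pvAfter m [] = [] := by
  rw [pvAfter]; split <;> simp

lemma pvAfter_cons (m : List Char) (c : Char) (cs : List Char) :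
    pvAfter m (c :: cs) = if m.isPrefixOf (c :: cs) then (c :: cs).drop m.length else pvAfter m cs := by
  rw [pvAfter]

lemma pvBefore_nil_left (s : List Char) : pvBefore [] s = [] := by
  cases s <;> rw [pvBefore] <;> simp

lemma pvAfter_nil_left (s : List Char) : pvAfter [] s = s := by
  cases s <;> rw [pvAfter] <;> simp

lemma pv_decomp (m s : List Char) (h : PySem.Chars.isIn m s = true) :
    s = pvBefore m s ++ m ++ pvAfter m s := by
  induction s with
  | nil =>
    have hm0 : m = [] := by simpa using (PySem.Chars.isIn_iff_infix m []).1 h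
    subst hm0
    simp [pvBefore_nil, pvAfter_nil]
  | cons c cs ih =>
    by_cases hp : m.isPrefixOf (c :: cs)
    · rw [pvBefore_cons, pvAfter_cons, if_pos hp, if_pos hp]
      have hpre := (List.isPrefixOf_iff_prefix).1 hp
      have hEq := List.prefix_iff_eq_append.1 hpre
      conv_lhs => rw [← hEq]
      simp
    · rw [pvBefore_cons, pvAfter_cons, if_neg hp, if_neg hp]
      rw [pv_isIn_cons, Bool.or_eq_true] at h
      rcases h with h | h
      · exact absurd h hp
      · simpa using congrArg (c :: ·) (ih h)

lemma pv_before_min (m s : List Char) :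
    ∀ j < (pvBefore m s).length, ¬ m <+: s.drop j := by
  induction s with
  | nil => intro j hj; rw [pvBefore_nil] at hj; simp at hj
  | cons c cs ih =>
    intro j hj
    by_cases hp : m.isPrefixOf (c :: cs)
    · rw [pvBefore_cons, if_pos hp] at hj; simp at hj
    · rw [pvBefore_cons, if_neg hp] at hj
      cases j with
      | zero =>
        simp only [List.drop_zero]
        exact fun hpre => hp ((List.isPrefixOf_iff_prefix).2 hpre)
      | succ j =>
        simp only [List.length_cons] at hj
        simp only [List.drop_succ_cons]
        exact ih j (by omega)

lemma pv_before_prefix (m s : List Char) (h : PySem.Chars.isIn m s = true) :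
    m <+: s.drop (pvBefore m s).length := by
  have hd := pv_decomp m s h
  generalize hB : pvBefore m s = b at *
  generalize hA : pvAfter m s = a at *
  subst hd
  rw [List.append_assoc, List.drop_left]
  exact List.prefix_append m a

lemma pv_find_eq (m s : List Char) (h : PySem.Chars.isIn m s = true) :
    PySem.Chars.find s m = ((pvBefore m s).length : Int) := by
  have hnn : 0 ≤ PySem.Chars.find s m := by
    rw [PySem.Chars.find_nonneg_iff]
    exact (PySem.Chars.isIn_iff_infix m s).1 h
  obtain ⟨hpre, hmin⟩ := PySem.Chars.find_spec hnn
  have h1 : ¬ (PySem.Chars.find s m).toNat < (pvBefore m s).length := fun hlt =>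
    pv_before_min m s _ hlt hpre
  have h2 : ¬ (pvBefore m s).length < (PySem.Chars.find s m).toNat := fun hlt =>
    hmin _ hlt (pv_before_prefix m s h)
  omega

lemma pv_find_neg (m s : List Char) (h : PySem.Chars.isIn m s = false) :
    PySem.Chars.find s m = -1 :=
  (PySem.Chars.find_eq_neg_one_iff s m).2 ((PySem.Chars.isIn_eq_false_iff m s).1 h)

-- ---------- append lemmas for before/after ----------

lemma pv_prefix_append_of_le (m u t : List Char) (hle : m.length ≤ u.length) :
    m <+: u ++ t ↔ m <+: u := by
  constructor
  · intro hp
    have h1 : m = (u ++ t).take m.length := List.prefix_iff_eq_take.1 hp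
    rw [List.take_append_of_le_length hle] at h1
    exact List.prefix_iff_eq_take.2 h1
  · exact fun hp => hp.trans (List.prefix_append u t)

lemma pv_isIn_append_left (m u t : List Char) (h : PySem.Chars.isIn m u = true) :
    PySem.Chars.isIn m (u ++ t) = true :=
  (PySem.Chars.isIn_iff_infix m (u ++ t)).2
    (((PySem.Chars.isIn_iff_infix m u).1 h).trans ⟨[], t, by simp⟩)

lemma pv_beforeAfter_append (m u t : List Char) (h : PySem.Chars.isIn m u = true) :
    pvBefore m (u ++ t) = pvBefore m u ∧ pvAfter m (u ++ t) = pvAfter m u ++ t := by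
  induction u with
  | nil =>
    have hm0 : m = [] := by simpa using (PySem.Chars.isIn_iff_infix m []).1 h
    subst hm0
    simp [pvBefore_nil_left, pvAfter_nil_left, pvBefore_nil, pvAfter_nil]
  | cons c cs ih =>
    by_cases hp : m.isPrefixOf (c :: cs)
    · have hp' : m.isPrefixOf ((c :: cs) ++ t) :=
        (List.isPrefixOf_iff_prefix).2 (((List.isPrefixOf_iff_prefix).1 hp).trans (List.prefix_append _ _))
      have hle : m.length ≤ (c :: cs).length := ((List.isPrefixOf_iff_prefix).1 hp).length_le
      refine ⟨?_, ?_⟩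
      · rw [List.cons_append, pvBefore_cons, if_pos (by simpa using hp'), pvBefore_cons, if_pos hp]
      · rw [List.cons_append, pvAfter_cons, if_pos (by simpa using hp'), pvAfter_cons, if_pos hp,
            ← List.cons_append, List.drop_append_of_le_length hle]
    · have hin' : PySem.Chars.isIn m cs = true := by
        rw [pv_isIn_cons, Bool.or_eq_true] at h
        rcases h with h | h
        · exact absurd h hp
        · exact h
      have hp' : ¬ m.isPrefixOf (c :: (cs ++ t)) := by
        intro hpp
        have hle : m.length ≤ (c :: cs).length := by
          have := ((PySem.Chars.isIn_iff_infix m cs).1 hin').length_le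
          simp
          omega
        exact hp ((List.isPrefixOf_iff_prefix).2
          ((pv_prefix_append_of_le m (c :: cs) t hle).1 (by simpa using (List.isPrefixOf_iff_prefix).1 hpp)))
      obtain ⟨ihb, iha⟩ := ih hin'
      refine ⟨?_, ?_⟩
      · rw [List.cons_append, pvBefore_cons, if_neg hp', ihb, pvBefore_cons, if_neg hp]
      · rw [List.cons_append, pvAfter_cons, if_neg hp', iha, pvAfter_cons, if_neg hp]

-- m nonempty, delimiter-free; c a delimiter: m never matches starting at c
lemma pv_notprefix_cons_delim (m : List Char) (hm : m ≠ []) (hmd : ∀ ch ∈ m, pvDelim ch = false)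
    (c : Char) (hc : pvDelim c = true) (t : List Char) : ¬ m.isPrefixOf (c :: t) := by
  cases m with
  | nil => exact absurd rfl hm
  | cons a as =>
    intro hp
    have hpre := (List.isPrefixOf_iff_prefix).1 hp
    have ha : a = c := by
      have h0 := List.prefix_iff_eq_take.1 hpre
      have h1 : (a :: as).head? = ((c :: t).take (a :: as).length).head? := congrArg List.head? h0
      simpa using h1
    have hfa := hmd a (by simp)
    rw [ha, hc] at hfa
    cases hfa

lemma pv_beforeAfter_notIn_delim (m : List Char) (hm : m ≠ []) (hmd : ∀ ch ∈ m, pvDelim ch = false)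
    (c : Char) (hc : pvDelim c = true) :
    ∀ (u : List Char), PySem.Chars.isIn m u = false →
      ∀ t, PySem.Chars.isIn m (u ++ c :: t) = PySem.Chars.isIn m t ∧
        pvBefore m (u ++ c :: t) = u ++ c :: pvBefore m t ∧
        pvAfter m (u ++ c :: t) = pvAfter m t := by
  intro u
  induction u with
  | nil =>
    intro _ t
    have hp := pv_notprefix_cons_delim m hm hmd c hc t
    refine ⟨?_, ?_, ?_⟩
    · rw [List.nil_append, pv_isIn_cons,
          show m.isPrefixOf (c :: t) = false from Bool.eq_false_iff.2 hp]
      simp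
    · rw [List.nil_append, pvBefore_cons, if_neg hp]
      simp
    · rw [List.nil_append, pvAfter_cons, if_neg hp]
  | cons d ds ih =>
    intro hin t
    rw [pv_isIn_cons, Bool.or_eq_false_iff] at hin
    obtain ⟨hpb, hin'⟩ := hin
    have hp' : ¬ m.isPrefixOf (d :: (ds ++ c :: t)) := by
      intro hpp
      have hpre := (List.isPrefixOf_iff_prefix).1 hpp
      by_cases hle : m.length ≤ (d :: ds).length
      · have hq : m <+: (d :: ds) :=
          (pv_prefix_append_of_le m (d :: ds) (c :: t) hle).1 (by simpa using hpre)
        have hq' := (List.isPrefixOf_iff_prefix).2 hq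
        rw [hpb] at hq'
        simp at hq'
      · have hmtake := List.prefix_iff_eq_take.1 hpre
        have hc' : m[(d :: ds).length]? = some c := by
          rw [hmtake, List.getElem?_take_of_lt (by simp at hle ⊢; omega)]
          rw [show (d :: (ds ++ c :: t)) = (d :: ds) ++ (c :: t) from rfl]
          rw [List.getElem?_append_right (le_refl _)]
          simp
        have hcm : c ∈ m := List.mem_of_getElem? hc'
        simp [hmd c hcm] at hc
    obtain ⟨h1, h2, h3⟩ := ih hin' t
    refine ⟨?_, ?_, ?_⟩
    · rw [List.cons_append, pv_isIn_cons,
          show m.isPrefixOf (d :: (ds ++ c :: t)) = false from Bool.eq_false_iff.2 hp', h1]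
      simp
    · rw [List.cons_append, pvBefore_cons, if_neg hp', h2]
      simp
    · rw [List.cons_append, pvAfter_cons, if_neg hp', h3]

-- ---------- token-length lemmas ----------

lemma pv_tokB_all (a : List Char) (h : ∀ ch ∈ a, pvDelim ch = false) : pvTokB a = a.length := by
  induction a with
  | nil => rfl
  | cons c cs ih =>
    rw [pvTokB, if_neg (by simp [h c (by simp)]), ih (fun ch hch => h ch (by simp [hch]))]
    rfl

lemma pv_tokB_append_delim (a : List Char) (ha : ∀ ch ∈ a, pvDelim ch = false)
    (c : Char) (hc : pvDelim c = true) (t : List Char) : pvTokB (a ++ c :: t) = a.length := by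
  induction a with
  | nil => simp [pvTokB, hc]
  | cons d ds ih =>
    rw [List.cons_append, pvTokB, if_neg (by simp [ha d (by simp)]),
        ih (fun ch hch => ha ch (by simp [hch]))]
    rfl

-- elements of pvAfter come from s
lemma pv_after_subset (m s : List Char) (h : PySem.Chars.isIn m s = true) :
    ∀ ch ∈ pvAfter m s, ch ∈ s := by
  intro ch hch
  rw [pv_decomp m s h]
  simp [hch]

-- ---------- segment lemmas ----------

lemma pv_flatten_segGo (s : List Char) : ∀ cur, (pvSegGo s cur).flatten = cur ++ s := by
  induction s with
  | nil =>
    intro cur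
    by_cases h : cur = []
    · simp [pvSegGo, h]
    · simp [pvSegGo, h]
  | cons c cs ih =>
    intro cur
    rw [pvSegGo]
    by_cases hd : pvDelim c
    · rw [if_pos hd]
      by_cases h : cur = []
      · subst h; simp [ih]
      · rw [if_neg h]; simp [ih]
    · rw [if_neg hd, ih]
      simp

-- the masked word, as B computes it from the find index
lemma pv_word_mask (m u : List Char) (hin : PySem.Chars.isIn m u = true) :
    PySem.List.slice u none (some (PySem.Chars.find u m)) ++ m
      ++ PySem.List.slice (PySem.List.slice u (some (PySem.Chars.find u m + (m.length : Int))) none) none (some 4)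
      ++ "***".toList
    = pvBefore m u ++ m ++ (pvAfter m u).take 4 ++ "***".toList := by
  rw [pv_find_eq m u hin]
  have hd := pv_decomp m u hin
  generalize hB : pvBefore m u = b at *
  generalize hA : pvAfter m u = a at *
  subst hd
  rw [PySem.List.slice_to_natCast]
  rw [show List.take b.length (b ++ m ++ a) = b from by
    rw [List.append_assoc]; exact List.take_left]
  rw [show ((b.length : Int) + (m.length : Int)) = ((b.length + m.length : Nat) : Int) from by
    push_cast; ring]
  rw [PySem.List.slice_from_natCast]
  rw [show (b ++ m ++ a).drop (b.length + m.length) = a from by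
    rw [show b.length + m.length = (b ++ m).length from by simp]
    exact List.drop_left]
  rw [pv_slice4]

-- main invariant: walking B's segments masks exactly like pvStepA on cur ++ s
lemma pv_maskLoop_eq (m : List Char) (hm : m ≠ []) (hmd : ∀ ch ∈ m, pvDelim ch = false) :
    ∀ (s cur : List Char), (∀ ch ∈ cur, pvDelim ch = false) →
      pvMaskLoop m (pvSegGo s cur) =
        if PySem.Chars.isIn m (cur ++ s) then
          pvBefore m (cur ++ s) ++ pvMaskTail m (pvAfter m (cur ++ s))
        else cur ++ s := by
  intro s
  induction s with
  | nil =>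
    intro cur hcur
    by_cases h : cur = []
    · subst h
      rw [pvSegGo, if_pos rfl, pvMaskLoop]
      simp [pv_isIn_nil hm]
    · rw [pvSegGo, if_neg h, pvMaskLoop]
      simp only [List.append_nil, List.flatten_nil]
      cases hin : PySem.Chars.isIn m cur with
      | false =>
        rw [if_neg (by rw [pv_find_neg m cur hin]; norm_num), pvMaskLoop]
        simp
      | true =>
        rw [if_pos (by rw [pv_find_eq m cur hin]; positivity)]
        rw [pv_word_mask m cur hin]
        have haft : ∀ ch ∈ pvAfter m cur, pvDelim ch = false :=
          fun ch hch => hcur ch (pv_after_subset m cur hin ch hch)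
        rw [pvMaskTail, pv_tokB_all _ haft, List.take_length, List.drop_length]
        simp
  | cons c cs ih =>
    intro cur hcur
    rw [pvSegGo]
    by_cases hd : pvDelim c
    · rw [if_pos hd]
      have hfc : PySem.Chars.find [c] m = -1 := by
        apply pv_find_neg
        rw [pv_isIn_cons,
            show m.isPrefixOf [c] = false from
              Bool.eq_false_iff.2 (pv_notprefix_cons_delim m hm hmd c hd []),
            pv_isIn_nil hm]
        rfl
      by_cases h : cur = []
      · subst h
        rw [if_pos rfl, pvMaskLoop, if_neg (by rw [hfc]; norm_num), ih [] (by simp)]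
        obtain ⟨h1, h2, h3⟩ := pv_beforeAfter_notIn_delim m hm hmd c hd [] (pv_isIn_nil hm) cs
        simp only [List.nil_append] at h1 h2 h3 ⊢
        rw [h1, h2, h3]
        cases hin' : PySem.Chars.isIn m cs with
        | false => simp
        | true => simp [pvMaskTail]
      · rw [if_neg h, pvMaskLoop]
        cases hin : PySem.Chars.isIn m cur with
        | true =>
          rw [if_pos (by rw [pv_find_eq m cur hin]; positivity)]
          rw [pv_word_mask m cur hin]
          obtain ⟨hb, ha⟩ := pv_beforeAfter_append m cur (c :: cs) hin
          have hflat : ([c] :: pvSegGo cs []).flatten = c :: cs := by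
            rw [List.flatten_cons, pv_flatten_segGo cs []]
            rfl
          have hIn := pv_isIn_append_left m cur (c :: cs) hin
          have haft : ∀ ch ∈ pvAfter m cur, pvDelim ch = false :=
            fun ch hch => hcur ch (pv_after_subset m cur hin ch hch)
          rw [hIn, hb, ha, pvMaskTail, pv_tokB_append_delim _ haft c hd cs,
              List.take_append_of_le_length (le_refl _), List.take_length,
              List.drop_append_of_le_length (le_refl _), List.drop_length, hflat]
          simp
        | false =>
          rw [if_neg (by rw [pv_find_neg m cur hin]; norm_num), pvMaskLoop,
              if_neg (by rw [hfc]; norm_num), ih [] (by simp)]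
          obtain ⟨h1, h2, h3⟩ := pv_beforeAfter_notIn_delim m hm hmd c hd cur hin cs
          simp only [List.nil_append]
          rw [h1, h2, h3]
          cases hin' : PySem.Chars.isIn m cs with
          | false => simp
          | true => simp
    · rw [if_neg hd, ih (cur ++ [c]) (by
        intro ch hch
        rcases List.mem_append.1 hch with hch | hch
        · exact hcur ch hch
        · simp at hch; subst hch; simpa using hd)]
      simp only [List.append_assoc, List.singleton_append]

lemma pv_B_eq_A_step (m s : List Char) (hm : m ≠ []) (hmd : ∀ ch ∈ m, pvDelim ch = false) :
    pvMaskLoop m (pvSegGo s []) = pvStepA s m := by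
  rw [pv_maskLoop_eq m hm hmd s [] (by simp), pv_stepA_eq m s hm]
  simp

lemma pv_all_not_delim (l : List Char) (h : l.all (fun c => !pvDelim c) = true) :
    ∀ ch ∈ l, pvDelim ch = false := by
  intro ch hch
  simpa using List.all_eq_true.1 h ch hch

-- ===== VERDICT (by name: the statement is the Claim_ definition above) =====
theorem mask_sensitive_command_py_spec : Claim_equal_mask_sensitive_command_py := by
  intro command _
  unfold Spec_mask_sensitive_command_py
  simp only [mask_sensitive_command_py, mask_sensitive_command_py_alt]
  rw [pv_B_eq_A_step "psession=".toList _ (by decide) (pv_all_not_delim _ (by decide)),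
      pv_B_eq_A_step "LEVEL2_1PANEL_PSESSION=".toList _ (by decide) (pv_all_not_delim _ (by decide))]
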